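-- pv_equiv track=rewrite | github.com/compgenomicslab/TreeProfiler | treeprofiler/src/utils.py | find_bool_representations
-- ===== SOURCE A (Python) =====
-- def find_bool_representations(column, rep=True):
--     true_values = {'true', 't', 'yes', 'y', '1'}
--     false_values = {'false', 'f', 'no', 'n', '0'}
--     ignore_values = {'nan', 'none', ''}  # Add other representations of NaN as needed
--
--     # Initialize sets to hold the representations of true and false values
--     count = 0
--
--     for value in column:
--         str_val = str(value).strip().lower()  # Normalize the string value
--         if str_val in ignore_values:
--             continue  # Skip this value
--         if rep:
--             if str_val in true_values:
--                 count += 1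
--         else:
--             if str_val in false_values:
--                count += 1
--
--     return count
-- ===== SOURCE B (Python) =====
-- def find_bool_representations(column, rep=True):
--     # Tabulate-then-select: build a frequency table of the normalized strings
--     # in one pass, then sum the counts of the five target keys.
--     counts = {}
--     for value in column:
--         s = str(value).strip().lower()
--         counts[s] = counts.get(s, 0) + 1
--     target = ('true', 't', 'yes', 'y', '1') if rep else ('false', 'f', 'no', 'n', '0')
--     return sum(counts.get(k, 0) for k in target)
-- ===== Notes on version B (the rewrite author's own statement) =====
-- stated objective: alternative
-- what changed: B builds a frequency table of the normalized strings in one pass and then sums the counts of the five target keys, instead of testing each element against the ignore/true/false sets inline; the ignore check disappears since those strings are never target keys.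
import Mathlib
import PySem

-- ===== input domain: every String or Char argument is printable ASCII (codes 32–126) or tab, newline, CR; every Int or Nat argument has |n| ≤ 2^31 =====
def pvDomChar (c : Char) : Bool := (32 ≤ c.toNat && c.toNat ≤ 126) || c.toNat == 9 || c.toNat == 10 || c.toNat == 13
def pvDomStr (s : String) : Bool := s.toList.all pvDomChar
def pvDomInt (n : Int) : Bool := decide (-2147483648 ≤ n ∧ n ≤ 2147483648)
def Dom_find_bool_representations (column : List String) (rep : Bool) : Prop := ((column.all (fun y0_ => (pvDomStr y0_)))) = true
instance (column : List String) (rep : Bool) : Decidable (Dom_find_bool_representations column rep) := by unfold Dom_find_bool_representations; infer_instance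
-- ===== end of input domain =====

-- B tabulates the normalized strings into a frequency dict in one pass and then sums the
-- counts of the five target keys (the ignore check disappears: those strings are never targets).

-- ===== PORT A =====
def find_bool_representations (column : List String) (rep : Bool) : Int :=
  let true_values := PySem.Set.ofList ["true", "t", "yes", "y", "1"]
  let false_values := PySem.Set.ofList ["false", "f", "no", "n", "0"]
  let ignore_values := PySem.Set.ofList ["nan", "none", ""]
  column.foldl (fun count value =>
    let str_val := PySem.Str.lower (PySem.Str.strip value)
    if PySem.Set.contains ignore_values str_val then count
    else if rep then
      (if PySem.Set.contains true_values str_val then count + 1 else count)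
    else
      (if PySem.Set.contains false_values str_val then count + 1 else count)) 0

-- ===== PORT B =====
def find_bool_representations_alt (column : List String) (rep : Bool) : Int :=
  let counts := column.foldl (fun d value =>
    let s := PySem.Str.lower (PySem.Str.strip value)
    d.insert s (d.getD s 0 + 1)) (PySem.Dict.empty : PySem.Dict String Int)
  let target := if rep then ["true", "t", "yes", "y", "1"] else ["false", "f", "no", "n", "0"]
  (target.map (fun k => counts.getD k 0)).sum

-- ===== PRECONDITION & SPEC =====
def Spec_find_bool_representations (column : List String) (rep : Bool) (out : Int) : Prop := out = find_bool_representations_alt column rep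
instance (column : List String) (rep : Bool) (out : Int) : Decidable (Spec_find_bool_representations column rep out) := by unfold Spec_find_bool_representations; infer_instance

-- ===== CLAIM (what is proved, stated in full; the proofs are below) =====
def Claim_equal_find_bool_representations : Prop := ∀ (column : List String) (rep : Bool), Dom_find_bool_representations column rep → Spec_find_bool_representations column rep (find_bool_representations column rep)

-- ===== LEMMAS AND PROOFS =====

-- literal set values (PySem.Set.ofList of distinct literals is the literal list)
lemma ofl_T : PySem.Set.ofList ["true", "t", "yes", "y", "1"] = ["true", "t", "yes", "y", "1"] := by rfl
lemma ofl_F : PySem.Set.ofList ["false", "f", "no", "n", "0"] = ["false", "f", "no", "n", "0"] := by rfl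
lemma ofl_I : PySem.Set.ofList ["nan", "none", ""] = ["nan", "none", ""] := by rfl

-- the ignore set is disjoint from each target set
lemma ign_of_T (s : String) (h : PySem.Set.contains (PySem.Set.ofList ["true", "t", "yes", "y", "1"]) s = true) :
    PySem.Set.contains (PySem.Set.ofList ["nan", "none", ""]) s = false := by
  rw [ofl_T] at h
  rw [ofl_I]
  simp [PySem.Set.contains_eq_listContains, List.contains_eq_mem] at h ⊢
  rcases h with h | h | h | h | h <;> subst h <;> decide

lemma ign_of_F (s : String) (h : PySem.Set.contains (PySem.Set.ofList ["false", "f", "no", "n", "0"]) s = true) :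
    PySem.Set.contains (PySem.Set.ofList ["nan", "none", ""]) s = false := by
  rw [ofl_F] at h
  rw [ofl_I]
  simp [PySem.Set.contains_eq_listContains, List.contains_eq_mem] at h ⊢
  rcases h with h | h | h | h | h <;> subst h <;> decide

-- a membership test against five distinct keys is the sum of the five equality tests
lemma key_T (x : String) :
    (if (PySem.Set.ofList ["true", "t", "yes", "y", "1"]).contains x then (1 : Int) else 0) =
    (if x == "true" then (1 : Int) else 0) + (if x == "t" then 1 else 0) + (if x == "yes" then 1 else 0) +
      (if x == "y" then 1 else 0) + (if x == "1" then 1 else 0) := by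
  rw [ofl_T]
  by_cases h1 : x = "true" <;> by_cases h2 : x = "t" <;> by_cases h3 : x = "yes" <;>
    by_cases h4 : x = "y" <;> by_cases h5 : x = "1" <;>
    simp [List.contains_eq_mem, beq_iff_eq, h1, h2, h3, h4, h5]

lemma key_F (x : String) :
    (if (PySem.Set.ofList ["false", "f", "no", "n", "0"]).contains x then (1 : Int) else 0) =
    (if x == "false" then (1 : Int) else 0) + (if x == "f" then 1 else 0) + (if x == "no" then 1 else 0) +
      (if x == "n" then 1 else 0) + (if x == "0" then 1 else 0) := by
  rw [ofl_F]
  by_cases h1 : x = "false" <;> by_cases h2 : x = "f" <;> by_cases h3 : x = "no" <;>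
    by_cases h4 : x = "n" <;> by_cases h5 : x = "0" <;>
    simp [List.contains_eq_mem, beq_iff_eq, h1, h2, h3, h4, h5]

-- counting the target hits equals summing the per-key counts
lemma sum_count_T (ns : List String) :
    ((ns.countP (fun s => PySem.Set.contains (PySem.Set.ofList ["true", "t", "yes", "y", "1"]) s) : Int)) =
    (ns.count "true" : Int) + ns.count "t" + ns.count "yes" + ns.count "y" + ns.count "1" := by
  induction ns with
  | nil => simp
  | cons x t ih =>
    simp only [List.countP_cons, List.count_cons]
    push_cast
    rw [key_T x]
    split_ifs <;> omega

lemma sum_count_F (ns : List String) :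
    ((ns.countP (fun s => PySem.Set.contains (PySem.Set.ofList ["false", "f", "no", "n", "0"]) s) : Int)) =
    (ns.count "false" : Int) + ns.count "f" + ns.count "no" + ns.count "n" + ns.count "0" := by
  induction ns with
  | nil => simp
  | cons x t ih =>
    simp only [List.countP_cons, List.count_cons]
    push_cast
    rw [key_F x]
    split_ifs <;> omega

-- ===== VERDICT (by name: the statement is the Claim_ definition above) =====
theorem find_bool_representations_spec : Claim_equal_find_bool_representations := by
  intro column rep _
  unfold Spec_find_bool_representations find_bool_representations find_bool_representations_alt
  simp only
  -- push the normalization through both folds: work over ns = column.map norm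
  have hB : column.foldl (fun d value =>
        PySem.Dict.insert d (PySem.Str.lower (PySem.Str.strip value))
          (d.getD (PySem.Str.lower (PySem.Str.strip value)) 0 + 1)) (PySem.Dict.empty : PySem.Dict String Int)
      = (column.map (fun value => PySem.Str.lower (PySem.Str.strip value))).foldl
          (fun d s => PySem.Dict.insert d s (d.getD s 0 + 1)) (PySem.Dict.empty : PySem.Dict String Int) := by
    rw [List.foldl_map]
  have hA : column.foldl (fun count value =>
        if PySem.Set.contains (PySem.Set.ofList ["nan", "none", ""]) (PySem.Str.lower (PySem.Str.strip value)) then count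
        else if rep then
          (if PySem.Set.contains (PySem.Set.ofList ["true", "t", "yes", "y", "1"]) (PySem.Str.lower (PySem.Str.strip value)) then count + 1 else count)
        else
          (if PySem.Set.contains (PySem.Set.ofList ["false", "f", "no", "n", "0"]) (PySem.Str.lower (PySem.Str.strip value)) then count + 1 else count)) (0 : Int)
      = (column.map (fun value => PySem.Str.lower (PySem.Str.strip value))).foldl
          (fun count s =>
            if PySem.Set.contains (PySem.Set.ofList ["nan", "none", ""]) s then count
            else if rep then
              (if PySem.Set.contains (PySem.Set.ofList ["true", "t", "yes", "y", "1"]) s then count + 1 else count)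
            else
              (if PySem.Set.contains (PySem.Set.ofList ["false", "f", "no", "n", "0"]) s then count + 1 else count)) (0 : Int) := by
    rw [List.foldl_map]
  rw [hA, hB]
  set ns := column.map (fun value => PySem.Str.lower (PySem.Str.strip value)) with hns
  clear hA hB hns
  cases rep with
  | true =>
    simp only [if_true, List.map_cons, List.map_nil,
      List.sum_cons, List.sum_nil, PySem.Dict.getD_foldl_insert_add_one, PySem.Dict.getD_empty]
    have h1 : ns.foldl (fun count s =>
        if PySem.Set.contains (PySem.Set.ofList ["nan", "none", ""]) s then count
        else (if PySem.Set.contains (PySem.Set.ofList ["true", "t", "yes", "y", "1"]) s then count + 1 else count)) (0 : Int)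
        = ns.foldl (fun count s =>
          if PySem.Set.contains (PySem.Set.ofList ["true", "t", "yes", "y", "1"]) s then count + 1 else count) (0 : Int) := by
      apply PySem.List.foldl_congr_mem
      intro a b _
      by_cases ht : PySem.Set.contains (PySem.Set.ofList ["true", "t", "yes", "y", "1"]) b = true
      · rw [ign_of_T b ht]; simp
      · simp only [Bool.not_eq_true] at ht
        rw [ht]; split <;> simp
    rw [h1, PySem.List.foldl_if_add_one, sum_count_T]
    ring
  | false =>
    simp only [Bool.false_eq_true, ite_false, List.map_cons, List.map_nil,
      List.sum_cons, List.sum_nil, PySem.Dict.getD_foldl_insert_add_one, PySem.Dict.getD_empty]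
    have h1 : ns.foldl (fun count s =>
        if PySem.Set.contains (PySem.Set.ofList ["nan", "none", ""]) s then count
        else (if PySem.Set.contains (PySem.Set.ofList ["false", "f", "no", "n", "0"]) s then count + 1 else count)) (0 : Int)
        = ns.foldl (fun count s =>
          if PySem.Set.contains (PySem.Set.ofList ["false", "f", "no", "n", "0"]) s then count + 1 else count) (0 : Int) := by
      apply PySem.List.foldl_congr_mem
      intro a b _
      by_cases hf : PySem.Set.contains (PySem.Set.ofList ["false", "f", "no", "n", "0"]) b = true
      · rw [ign_of_F b hf]; simp
      · simp only [Bool.not_eq_true] at hf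
        rw [hf]; split <;> simp
    rw [h1, PySem.List.foldl_if_add_one, sum_count_F]
    ring
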